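-- pv_equiv track=rewrite | github.com/0Alice/Browser | Document.py | createBagOfWords
-- ===== SOURCE A (Python) =====
-- def createBagOfWords(listOfWords, terms):
--     bagOfWords = {}
--     for term in terms:
--         bagOfWords[term] = 0
--
--     for word in listOfWords:
--         if (word in terms):
--             bagOfWords[word] += 1
--
--     return bagOfWords
-- ===== SOURCE B (Python) =====
-- def createBagOfWords(listOfWords, terms):
--     return {term: listOfWords.count(term) for term in terms}
-- ===== Notes on version B (the rewrite author's own statement) =====
-- stated objective: simpler
-- what changed: Replaces A's zero-seeded dict plus a membership-guarded single pass over the words with a one-line dict comprehension that scans the word list once per term (per-term counting, O(T*W) nested scans, no zero-initialization pass).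
import Mathlib
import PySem

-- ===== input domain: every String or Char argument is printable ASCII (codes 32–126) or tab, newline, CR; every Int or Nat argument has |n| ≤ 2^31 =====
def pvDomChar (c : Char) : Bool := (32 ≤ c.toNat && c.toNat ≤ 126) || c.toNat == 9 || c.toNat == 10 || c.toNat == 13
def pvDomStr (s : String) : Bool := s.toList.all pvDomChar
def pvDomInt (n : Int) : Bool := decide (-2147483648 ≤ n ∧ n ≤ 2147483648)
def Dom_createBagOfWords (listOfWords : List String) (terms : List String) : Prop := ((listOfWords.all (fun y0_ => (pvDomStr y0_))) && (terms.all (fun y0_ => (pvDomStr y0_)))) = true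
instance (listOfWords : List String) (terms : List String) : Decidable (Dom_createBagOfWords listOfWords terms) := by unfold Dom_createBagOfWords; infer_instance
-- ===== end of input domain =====

-- B replaces A's zero-seeded dict plus membership-guarded word pass with a per-term
-- counting dict comprehension (simpler; same result).

-- ===== PORT A =====
def createBagOfWords (listOfWords : List String) (terms : List String) : List (String × Int) :=
  -- bagOfWords = {}; for term in terms: bagOfWords[term] = 0
  let bag0 : PySem.Dict String Int :=
    terms.foldl (fun d term => d.insert term 0) PySem.Dict.empty
  -- for word in listOfWords: if word in terms: bagOfWords[word] += 1
  let bag1 : PySem.Dict String Int :=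
    listOfWords.foldl (fun d word => if terms.contains word then d.modify word 0 (· + 1) else d) bag0
  bag1.items

-- ===== PORT B =====
def createBagOfWords_alt (listOfWords : List String) (terms : List String) : List (String × Int) :=
  (terms.foldl (fun d term => d.insert term (listOfWords.count term : Int)) PySem.Dict.empty).items

-- ===== PRECONDITION & SPEC =====
def Spec_createBagOfWords (listOfWords : List String) (terms : List String) (out : List (String × Int)) : Prop := out = createBagOfWords_alt listOfWords terms
instance (listOfWords : List String) (terms : List String) (out : List (String × Int)) : Decidable (Spec_createBagOfWords listOfWords terms out) := by unfold Spec_createBagOfWords; infer_instance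

-- ===== CLAIM (what is proved, stated in full; the proofs are below) =====
def Claim_equal_createBagOfWords : Prop := ∀ (listOfWords : List String) (terms : List String), Dom_createBagOfWords listOfWords terms → Spec_createBagOfWords listOfWords terms (createBagOfWords listOfWords terms)

-- ===== LEMMAS AND PROOFS =====

-- getD through a fold of inserts with key-determined values
theorem getD_foldl_insert_fn (c : String → Int) (terms : List String) :
    ∀ (d : PySem.Dict String Int) (k : String),
      (terms.foldl (fun d t => d.insert t (c t)) d).getD k 0
        = if k ∈ terms then c k else d.getD k 0 := by
  induction terms with
  | nil => intro d k; simp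
  | cons t ts ih =>
    intro d k
    simp only [List.foldl_cons, ih, PySem.Dict.getD_insert, List.mem_cons]
    by_cases h1 : k ∈ ts <;> by_cases h2 : k = t <;> simp [h1, h2]

theorem keys_zero_seed (terms : List String) :
    (terms.foldl (fun d t => d.insert t (0 : Int)) PySem.Dict.empty).keys
      = PySem.Set.ofList terms := by
  rw [PySem.Dict.keys_foldl_insert]
  simp [PySem.Dict.keys_empty, PySem.Set.update_nil_left]

theorem keys_alt (ws terms : List String) :
    (terms.foldl (fun d t => d.insert t ((ws.count t : Int))) PySem.Dict.empty).keys
      = PySem.Set.ofList terms := by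
  rw [PySem.Dict.keys_foldl_insert]
  simp [PySem.Dict.keys_empty, PySem.Set.update_nil_left]

theorem createBagOfWords_spec : Claim_equal_createBagOfWords := by
  unfold Claim_equal_createBagOfWords
  intro ws terms _
  unfold Spec_createBagOfWords createBagOfWords createBagOfWords_alt
  -- name the intermediate dicts
  set Z : PySem.Dict String Int :=
    terms.foldl (fun d t => d.insert t 0) PySem.Dict.empty with hZ
  set A : PySem.Dict String Int :=
    ws.foldl (fun d w => if terms.contains w then d.modify w 0 (· + 1) else d) Z with hA
  set B : PySem.Dict String Int :=
    terms.foldl (fun d t => d.insert t ((ws.count t : Int))) PySem.Dict.empty with hB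
  -- rewrite A's guarded loop as a loop over the filtered word list
  have hA' : A = (ws.filter (fun w => terms.contains w)).foldl
      (fun d w => d.modify w 0 (· + 1)) Z := by
    rw [hA, PySem.List.foldl_if_eq_foldl_filter]
  -- keys of Z / A / B
  have hZk : Z.keys = PySem.Set.ofList terms := keys_zero_seed terms
  have hAk : A.keys = PySem.Set.ofList terms := by
    rw [hA', PySem.Dict.keys_foldl_modify, hZk, PySem.Set.update_eq_append_filter]
    have : (PySem.Set.ofList (ws.filter (fun w => terms.contains w))).filter
        (fun y => !(PySem.Set.contains (PySem.Set.ofList terms) y)) = [] := by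
      apply List.filter_eq_nil_iff.mpr
      intro y hy
      have hy' : y ∈ ws.filter (fun w => terms.contains w) := by
        exact (PySem.Set.mem_ofList _ _).mp hy
      have hyT : y ∈ terms := by
        have := (List.mem_filter.mp hy').2
        simpa [List.contains_eq_mem] using this
      simp [PySem.Set.contains, PySem.Set.mem_ofList, hyT]
    rw [this, List.append_nil]
  have hBk : B.keys = PySem.Set.ofList terms := keys_alt ws terms
  -- nodup keys
  have hZn : Z.keys.Nodup := by
    rw [hZk]; exact PySem.Set.nodup_ofList terms
  have hAn : A.keys.Nodup := by
    rw [hAk]; exact PySem.Set.nodup_ofList terms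
  have hBn : B.keys.Nodup := by
    rw [hBk]; exact PySem.Set.nodup_ofList terms
  -- values
  have hZv : ∀ k, Z.getD k 0 = 0 := by
    intro k
    rw [hZ, getD_foldl_insert_fn (fun _ => 0)]
    simp
  have hAv : ∀ k, k ∈ terms → A.getD k 0 = (ws.count k : Int) := by
    intro k hk
    rw [hA', PySem.Dict.getD_foldl_modify_add_one, hZv]
    have : (ws.filter (fun w => terms.contains w)).count k = ws.count k := by
      apply List.count_filter
      simp [List.contains_eq_mem, hk]
    rw [this]; ring
  have hBv : ∀ k, k ∈ terms → B.getD k 0 = (ws.count k : Int) := by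
    intro k hk
    rw [hB, getD_foldl_insert_fn (fun t => (ws.count t : Int))]
    simp [hk]
  -- items via the key maps
  rw [PySem.Dict.items_eq_map_keys A hAn 0, PySem.Dict.items_eq_map_keys B hBn 0, hAk, hBk]
  apply List.map_congr_left
  intro k hk
  have hkt : k ∈ terms := (PySem.Set.mem_ofList _ _).mp hk
  rw [hAv k hkt, hBv k hkt]
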